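-- pv_equiv track=rewrite | github.com/zaojiahua/coral | app/v1/Cuttle/basic/common_utli.py | blur_match
-- ===== SOURCE A (Python) =====
-- def blur_match(words_list, identify_words_list):
--     for word in set(words_list):
--         for indentify_word in set(identify_words_list):
--             if word in indentify_word:
--                 break
--         else:
--             return 1
--     return 0
-- ===== SOURCE B (Python) =====
-- def blur_match(words_list, identify_words_list):
--     # One combined text: a word matches some identify word iff it occurs in the
--     # sentinel-joined text (words never contain the NUL sentinel), so each word
--     # needs a single fast substring query instead of a scan over identify words.
--     if not identify_words_list:
--         return 1 if words_list else 0
--     joined = "\x00".join(identify_words_list)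
--     for word in words_list:
--         if word not in joined:
--             return 1
--     return 0
-- ===== Notes on version B (the rewrite author's own statement) =====
-- stated objective: faster
-- what changed: B removes A's inner scan over identify words: it joins the identify words once with a NUL sentinel (absent from printable-ASCII input) and answers each word with a single substring query on that combined text.
import Mathlib
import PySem

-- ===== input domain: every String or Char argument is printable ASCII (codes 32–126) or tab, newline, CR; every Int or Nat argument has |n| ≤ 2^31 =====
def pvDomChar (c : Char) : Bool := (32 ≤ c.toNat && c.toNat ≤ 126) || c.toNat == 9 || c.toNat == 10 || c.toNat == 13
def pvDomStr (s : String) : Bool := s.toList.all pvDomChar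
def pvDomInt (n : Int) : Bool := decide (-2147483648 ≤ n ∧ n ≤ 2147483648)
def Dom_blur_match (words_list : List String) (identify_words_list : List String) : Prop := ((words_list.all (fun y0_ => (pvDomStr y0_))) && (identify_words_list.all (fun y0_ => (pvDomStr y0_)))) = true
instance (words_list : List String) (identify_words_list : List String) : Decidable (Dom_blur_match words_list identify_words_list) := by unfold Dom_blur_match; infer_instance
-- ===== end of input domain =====

-- B replaces A's nested scan (each word against every identify word) by one NUL-joined text of
-- the identify words and a single substring query per word (words in Dom never contain NUL).

-- ===== PORT A =====
-- inner 'for indentify_word in set(...): if word in indentify_word: break / else: return 1'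
def pvInnerA (word : String) : List String → Bool
  | [] => false
  | iw :: t => if PySem.Str.isIn word iw then true else pvInnerA word t

-- outer 'for word in set(words_list)'
def pvOuterA (ids : List String) : List String → Int
  | [] => 0
  | w :: t => if pvInnerA w ids then pvOuterA ids t else 1

def blur_match (words_list : List String) (identify_words_list : List String) : Int :=
  pvOuterA (PySem.Set.ofList identify_words_list) (PySem.Set.ofList words_list)

-- ===== PORT B =====
-- 'for word in words_list: if word not in joined: return 1'
def pvLoopB (joined : String) : List String → Int
  | [] => 0
  | w :: t => if !(PySem.Str.isIn w joined) then 1 else pvLoopB joined t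

def blur_match_alt (words_list : List String) (identify_words_list : List String) : Int :=
  if identify_words_list = [] then (if words_list = [] then 0 else 1)
  else pvLoopB (PySem.Str.join "\x00" identify_words_list) words_list

-- ===== PRECONDITION & SPEC =====
def Spec_blur_match (words_list : List String) (identify_words_list : List String) (out : Int) : Prop := out = blur_match_alt words_list identify_words_list
instance (words_list : List String) (identify_words_list : List String) (out : Int) : Decidable (Spec_blur_match words_list identify_words_list out) := by unfold Spec_blur_match; infer_instance

-- ===== CLAIM (what is proved, stated in full; the proofs are below) =====
def Claim_equal_blur_match : Prop := ∀ (words_list : List String) (identify_words_list : List String), Dom_blur_match words_list identify_words_list → Spec_blur_match words_list identify_words_list (blur_match words_list identify_words_list)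

-- ===== LEMMAS AND PROOFS =====

theorem pvInnerA_eq_true (w : String) (ids : List String) :
    pvInnerA w ids = true ↔ ∃ iw ∈ ids, PySem.Str.isIn w iw = true := by
  induction ids with
  | nil => simp [pvInnerA]
  | cons iw t ih =>
    simp only [pvInnerA]
    by_cases h : PySem.Str.isIn w iw = true
    · rw [if_pos h]
      exact ⟨fun _ => ⟨iw, List.mem_cons_self .., h⟩, fun _ => rfl⟩
    · rw [if_neg h, ih]
      constructor
      · rintro ⟨x, hx, hs⟩
        exact ⟨x, List.mem_cons_of_mem _ hx, hs⟩
      · rintro ⟨x, hx, hs⟩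
        rcases List.mem_cons.1 hx with rfl | hx
        · exact absurd hs h
        · exact ⟨x, hx, hs⟩

theorem pvOuterA_eq (ids ws : List String) :
    pvOuterA ids ws =
      if ∀ w ∈ ws, ∃ iw ∈ ids, PySem.Str.isIn w iw = true then 0 else 1 := by
  induction ws with
  | nil => simp [pvOuterA]
  | cons w t ih =>
    simp only [pvOuterA]
    by_cases h : pvInnerA w ids = true
    · rw [if_pos h, ih]
      have hw := (pvInnerA_eq_true w ids).1 h
      by_cases ht : ∀ x ∈ t, ∃ iw ∈ ids, PySem.Str.isIn x iw = true
      · rw [if_pos ht, if_pos]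
        intro x hx
        rcases List.mem_cons.1 hx with rfl | hx
        · exact hw
        · exact ht x hx
      · rw [if_neg ht, if_neg]
        intro hall
        exact ht fun x hx => hall x (List.mem_cons_of_mem _ hx)
    · rw [if_neg h, if_neg]
      intro hall
      exact h ((pvInnerA_eq_true w ids).2 (hall w (List.mem_cons_self ..)))

theorem pvLoopB_eq (joined : String) (ws : List String) :
    pvLoopB joined ws =
      if ∀ w ∈ ws, PySem.Str.isIn w joined = true then 0 else 1 := by
  induction ws with
  | nil => simp [pvLoopB]
  | cons w t ih =>
    simp only [pvLoopB]
    by_cases h : PySem.Str.isIn w joined = true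
    · rw [h, ih]
      simp only [Bool.not_true, Bool.false_eq_true, if_false]
      by_cases ht : ∀ x ∈ t, PySem.Str.isIn x joined = true
      · rw [if_pos ht, if_pos]
        intro x hx
        rcases List.mem_cons.1 hx with rfl | hx
        · exact h
        · exact ht x hx
      · rw [if_neg ht, if_neg]
        intro hall
        exact ht fun x hx => hall x (List.mem_cons_of_mem _ hx)
    · rw [Bool.not_eq_true] at h
      simp only [h, Bool.not_false, if_true]
      rw [if_neg]
      intro hall
      have := hall w (List.mem_cons_self ..)
      rw [h] at this
      cases this

-- w occurs in a ++ c :: b, and w does not contain c, iff w occurs in a or in b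
theorem infix_append_cons (c : Char) (w a b : List Char) (hc : c ∉ w) :
    w <:+: a ++ c :: b ↔ w <:+: a ∨ w <:+: b := by
  constructor
  · rintro ⟨p, s, h⟩
    by_cases h1 : p.length + w.length ≤ a.length
    · left
      have hpw : p ++ w <+: a ++ c :: b := ⟨s, by simpa [List.append_assoc] using h⟩
      have hpa : p ++ w <+: a := by
        apply List.prefix_of_prefix_length_le hpw (List.prefix_append a (c :: b))
        simpa using h1
      rcases hpa with ⟨t, ht⟩
      exact ⟨p, t, by rw [← ht]; try simp [List.append_assoc]⟩
    · have hlen : a.length + 1 + b.length = p.length + w.length + s.length := by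
        have hl := congrArg List.length h
        simp only [List.length_append, List.length_cons] at hl
        omega
      by_cases h2 : a.length + 1 ≤ p.length
      · right
        have hws : w ++ s <:+ a ++ c :: b := ⟨p, by simpa [List.append_assoc] using h⟩
        have hsb : w ++ s <:+ b := by
          apply List.suffix_of_suffix_length_le hws ⟨a ++ [c], by simp⟩
          simp only [List.length_append]
          omega
        rcases hsb with ⟨t, ht⟩
        exact ⟨t, s, by rw [← ht]; try simp [List.append_assoc]⟩
      · exfalso
        have hq := congrArg (fun l => l[a.length]?) h
        simp only at hq
        rw [List.getElem?_append_right (le_refl a.length)] at hq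
        simp only [Nat.sub_self, List.getElem?_cons_zero] at hq
        rw [List.getElem?_append_left (by simp only [List.length_append]; omega),
            List.getElem?_append_right (by omega : p.length ≤ a.length)] at hq
        exact hc (List.mem_of_getElem? hq)
  · rintro (⟨p, s, h⟩ | ⟨p, s, h⟩)
    · exact ⟨p, s ++ c :: b, by rw [← h]; try simp [List.append_assoc]⟩
    · exact ⟨a ++ c :: p, s, by rw [← h]; try simp [List.append_assoc]⟩

theorem infix_join_iff (c : Char) (w : List Char) (hc : c ∉ w) :
    ∀ ids : List (List Char), ids ≠ [] →
      (w <:+: PySem.Chars.join [c] ids ↔ ∃ s ∈ ids, w <:+: s) := by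
  intro ids
  induction ids with
  | nil => intro h; exact absurd rfl h
  | cons x t ih =>
    intro _
    cases t with
    | nil =>
      rw [PySem.Chars.join_singleton]
      simp
    | cons y u =>
      rw [PySem.Chars.join_cons_cons]
      have : x ++ [c] ++ PySem.Chars.join [c] (y :: u) =
          x ++ c :: PySem.Chars.join [c] (y :: u) := by simp [List.append_assoc]
      rw [this, infix_append_cons c w _ _ hc, ih (by simp)]
      constructor
      · rintro (hx | ⟨s, hs, hws⟩)
        · exact ⟨x, List.mem_cons_self .., hx⟩
        · exact ⟨s, List.mem_cons_of_mem _ hs, hws⟩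
      · rintro ⟨s, hs, hws⟩
        rcases List.mem_cons.1 hs with rfl | hs
        · exact Or.inl hws
        · exact Or.inr ⟨s, hs, hws⟩

theorem ofList_nil_iff (xs : List String) : PySem.Set.ofList xs = [] ↔ xs = [] := by
  cases xs with
  | nil => simp
  | cons x t =>
    constructor
    · intro h
      have hx : x ∈ PySem.Set.ofList (x :: t) := (PySem.Set.mem_ofList ..).2 (List.mem_cons_self ..)
      rw [h] at hx
      cases hx
    · intro h
      exact (List.cons_ne_nil x t h).elim

theorem blur_match_spec : Claim_equal_blur_match := by
  intro words_list identify_words_list hdom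
  unfold Spec_blur_match blur_match blur_match_alt
  have hdom' := hdom
  unfold Dom_blur_match at hdom'
  simp only [Bool.and_eq_true, List.all_eq_true] at hdom'
  by_cases hids : identify_words_list = []
  · subst hids
    rw [if_pos rfl, pvOuterA_eq]
    by_cases hws : words_list = []
    · subst hws
      simp
    · rw [if_neg hws, if_neg]
      intro hall
      have hne : PySem.Set.ofList words_list ≠ [] := fun h => hws ((ofList_nil_iff _).1 h)
      rcases List.exists_mem_of_ne_nil _ hne with ⟨w, hw⟩
      rcases hall w hw with ⟨iw, hiw, _⟩
      rw [PySem.Set.mem_ofList] at hiw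
      cases hiw
  · rw [if_neg hids, pvOuterA_eq, pvLoopB_eq]
    congr 1
    simp only [eq_iff_iff]
    have hkey : ∀ w ∈ words_list,
        (PySem.Str.isIn w (PySem.Str.join "\x00" identify_words_list) = true ↔
          ∃ iw ∈ identify_words_list, PySem.Str.isIn w iw = true) := by
      intro w hw
      have hcw : '\x00' ∉ w.toList := by
        intro hmem
        have := (List.all_eq_true.1 (hdom'.1 w hw)) _ hmem
        simp [pvDomChar] at this
      rw [PySem.Str.isIn_iff_infix, PySem.Str.toList_join]
      have hsep : ("\x00" : String).toList = ['\x00'] := by decide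
      rw [hsep, infix_join_iff '\x00' w.toList hcw _ (by simpa using hids)]
      constructor
      · rintro ⟨s, hs, hws⟩
        rcases List.mem_map.1 hs with ⟨iw, hiw, rfl⟩
        exact ⟨iw, hiw, (PySem.Str.isIn_iff_infix ..).2 hws⟩
      · rintro ⟨iw, hiw, hws⟩
        exact ⟨iw.toList, List.mem_map_of_mem hiw, (PySem.Str.isIn_iff_infix ..).1 hws⟩
    constructor
    · intro h w hw
      rcases h w ((PySem.Set.mem_ofList ..).2 hw) with ⟨iw, hiw, hs⟩
      refine (hkey w hw).2 ⟨iw, (PySem.Set.mem_ofList ..).1 hiw, hs⟩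
    · intro h w hw
      rw [PySem.Set.mem_ofList] at hw
      rcases (hkey w hw).1 (h w hw) with ⟨iw, hiw, hs⟩
      exact ⟨iw, (PySem.Set.mem_ofList ..).2 hiw, hs⟩
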